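-- pv_equiv track=rewrite | github.com/l00kingactual/l00kingactual | tools/data_upload.py | determine_field_types
-- ===== SOURCE A (Python) =====
-- def determine_field_types(rows):
--     field_types = {}
--     for row in rows:
--         for key, value in row.items():
--             if key not in field_types:
--                 field_types[key] = 'INT'
--             if not str(value).isnumeric():
--                 field_types[key] = 'VARCHAR(255)'
--     return field_types
-- ===== SOURCE B (Python) =====
-- def determine_field_types(rows):
--     # group values by key (first-appearance order), then classify each key in one pass
--     groups = {}
--     for row in rows:
--         for key, value in row.items():
--             groups[key] = groups.get(key, []) + [value]
--     field_types = {}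
--     for key, values in groups.items():
--         field_types[key] = 'INT' if all(str(v).isnumeric() for v in values) else 'VARCHAR(255)'
--     return field_types
-- ===== Notes on version B (the rewrite author's own statement) =====
-- stated objective: alternative
-- what changed: Replaces A's fused single scan that mutates the type table per value with a two-phase decomposition: first group all values by key into an ordered dict, then classify each key once with all(...).
import Mathlib
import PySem

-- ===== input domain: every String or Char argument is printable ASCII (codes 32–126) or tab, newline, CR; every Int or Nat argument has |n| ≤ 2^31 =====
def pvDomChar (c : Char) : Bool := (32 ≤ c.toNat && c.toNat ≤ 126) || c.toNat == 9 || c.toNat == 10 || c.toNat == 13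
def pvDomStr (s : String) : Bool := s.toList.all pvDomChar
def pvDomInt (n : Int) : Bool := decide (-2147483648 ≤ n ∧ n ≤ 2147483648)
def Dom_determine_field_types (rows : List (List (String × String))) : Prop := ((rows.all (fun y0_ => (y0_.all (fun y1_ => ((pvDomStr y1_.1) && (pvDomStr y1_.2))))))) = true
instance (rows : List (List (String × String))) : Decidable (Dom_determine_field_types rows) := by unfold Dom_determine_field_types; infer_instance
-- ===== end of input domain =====

-- B replaces A's fused scan (mutating the type table per value) by a grouping phase followed by a classification phase; return value only, same cost.

-- ===== PORT A =====
-- one inner-loop body of A: the two ifs, in Python's order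
def pvStepA (ft : PySem.Dict String String) (kv : String × String) : PySem.Dict String String :=
  let ft1 := if !ft.contains kv.1 then ft.insert kv.1 "INT" else ft
  if !PySem.Str.strIsdigit kv.2 then ft1.insert kv.1 "VARCHAR(255)" else ft1

def determine_field_types (rows : List (List (String × String))) : List (String × String) :=
  (rows.foldl (fun ft row => row.foldl pvStepA ft) (PySem.Dict.empty : PySem.Dict String String)).items

-- ===== PORT B =====
def pvCls (vs : List String) : String :=
  if vs.all PySem.Str.strIsdigit then "INT" else "VARCHAR(255)"

def determine_field_types_alt (rows : List (List (String × String))) : List (String × String) :=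
  let groups : PySem.Dict String (List String) :=
    rows.foldl (fun g row => row.foldl (fun g kv => g.modify kv.1 [] (fun vs => vs ++ [kv.2])) g) PySem.Dict.empty
  (groups.items.foldl (fun ft p => ft.insert p.1 (pvCls p.2)) (PySem.Dict.empty : PySem.Dict String String)).items

-- ===== PRECONDITION & SPEC =====
def Spec_determine_field_types (rows : List (List (String × String))) (out : List (String × String)) : Prop := out = determine_field_types_alt rows
instance (rows : List (List (String × String))) (out : List (String × String)) : Decidable (Spec_determine_field_types rows out) := by unfold Spec_determine_field_types; infer_instance

-- ===== CLAIM (what is proved, stated in full; the proofs are below) =====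
def Claim_equal_determine_field_types : Prop := ∀ (rows : List (List (String × String))), Dom_determine_field_types rows → Spec_determine_field_types rows (determine_field_types rows)

-- ===== LEMMAS AND PROOFS =====

theorem pvStepA_contains (d : PySem.Dict String String) (p : String × String) (k : String) :
    (pvStepA d p).contains k = (k == p.1 || d.contains k) := by
  unfold pvStepA
  split_ifs <;> simp_all [PySem.Dict.contains_insert]

theorem pvStepA_getD (d : PySem.Dict String String) (p : String × String) (k dflt : String) :
    (pvStepA d p).getD k dflt =
      if k = p.1 then
        (if PySem.Str.strIsdigit p.2 then
           (if d.contains p.1 then d.getD p.1 dflt else "INT")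
         else "VARCHAR(255)")
      else d.getD k dflt := by
  unfold pvStepA
  split_ifs with h1 h2 <;> simp_all [PySem.Dict.getD_insert]

theorem pvStepA_keys (d : PySem.Dict String String) (p : String × String) :
    (pvStepA d p).keys = PySem.Set.add d.keys p.1 := by
  by_cases hc : d.contains p.1 = true
  · have hmem : p.1 ∈ d.keys := (PySem.Dict.contains_iff_mem_keys d p.1).mp hc
    by_cases hnum : PySem.Chars.strIsdigit p.2.toList = true
    · simp [pvStepA, PySem.Set.add, PySem.Str.strIsdigit, hc, hnum, hmem]
    · simp [pvStepA, PySem.Set.add, PySem.Str.strIsdigit, hc, hnum, hmem,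
        PySem.Dict.keys_insert_of_contains d _ hc]
  · have hc' : d.contains p.1 = false := by simpa using hc
    have hmem : p.1 ∉ d.keys := fun h => by
      simp [(PySem.Dict.contains_iff_mem_keys d p.1).mpr h] at hc'
    have h2 : (d.insert p.1 "INT").contains p.1 = true := PySem.Dict.contains_insert_self _ _ _
    by_cases hnum : PySem.Chars.strIsdigit p.2.toList = true
    · simp [pvStepA, PySem.Set.add, PySem.Str.strIsdigit, hc', hnum, hmem,
        PySem.Dict.keys_insert_of_not_contains d _ hc']
    · simp [pvStepA, PySem.Set.add, PySem.Str.strIsdigit, hc', hnum, hmem,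
        PySem.Dict.keys_insert_of_contains _ _ h2, PySem.Dict.keys_insert_of_not_contains d _ hc']

theorem pvFoldA_keys (ps : List (String × String)) (d : PySem.Dict String String) :
    (ps.foldl pvStepA d).keys = PySem.Set.update d.keys (ps.map Prod.fst) := by
  induction ps generalizing d with
  | nil => simp [PySem.Set.update_nil]
  | cons p ps ih =>
    simp only [List.foldl_cons, List.map_cons, PySem.Set.update_cons]
    rw [ih, pvStepA_keys]

theorem pvFoldA_getD (ps : List (String × String)) (d : PySem.Dict String String)
    (k dflt : String) :
    (ps.foldl pvStepA d).getD k dflt =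
      if (ps.filter (fun p => p.1 == k)).all (fun p => PySem.Str.strIsdigit p.2) then
        (if d.contains k then d.getD k dflt
         else if (ps.map Prod.fst).contains k then "INT" else dflt)
      else "VARCHAR(255)" := by
  induction ps generalizing d with
  | nil =>
    simp only [List.foldl_nil, List.filter_nil, List.all_nil, List.map_nil, if_true]
    by_cases hdc : d.contains k = true
    · simp [hdc]
    · have hdc' : d.contains k = false := by simpa using hdc
      simp [hdc', PySem.Dict.getD_of_not_contains d dflt hdc']
  | cons p ps ih =>
    simp only [List.foldl_cons]
    rw [ih, pvStepA_contains, pvStepA_getD]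
    by_cases hkp : k = p.1
    · subst hkp
      by_cases hnum : PySem.Chars.strIsdigit p.2.toList = true <;>
      by_cases hall : ((ps.filter fun p' => p'.1 == p.1).all fun p' => PySem.Chars.strIsdigit p'.2.toList) = true <;>
      by_cases hdc : d.contains p.1 = true <;>
        simp [PySem.Str.strIsdigit, hnum, hall, hdc]
    · have h1 : (p.1 == k) = false := beq_eq_false_iff_ne.mpr (fun h => hkp h.symm)
      have h2 : (k == p.1) = false := beq_eq_false_iff_ne.mpr hkp
      simp only [List.filter_cons, h1, h2, List.map_cons, List.contains_cons,
        Bool.false_eq_true, if_false, Bool.false_or]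
      simp [hkp]

theorem pvB_items (rows : List (List (String × String))) :
    determine_field_types_alt rows =
      (PySem.Set.ofList (rows.flatten.map Prod.fst)).map
        (fun k => (k, pvCls ((rows.flatten.filter fun p => p.1 == k).map (fun p => p.2)))) := by
  unfold determine_field_types_alt
  rw [← List.foldl_flatten]
  have hGkeys : (rows.flatten.foldl (fun g kv => g.modify kv.1 [] fun vs => vs ++ [kv.2])
      (PySem.Dict.empty : PySem.Dict String (List String))).keys
      = PySem.Set.ofList (rows.flatten.map Prod.fst) := by
    rw [PySem.Dict.keys_foldl_modify_key rows.flatten Prod.fst []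
      (fun _ kv => fun vs => vs ++ [kv.2])]
    simp [PySem.Set.update_nil_left]
  have hGnodup : (rows.flatten.foldl (fun g kv => g.modify kv.1 [] fun vs => vs ++ [kv.2])
      (PySem.Dict.empty : PySem.Dict String (List String))).keys.Nodup := by
    rw [hGkeys]; exact PySem.Set.nodup_ofList _
  rw [PySem.Dict.items_foldl_insert_fresh _ Prod.fst (fun p => pvCls p.2) PySem.Dict.empty
    (by intro a _; rfl) (by exact hGnodup)]
  rw [PySem.Dict.items_eq_map_keys _ hGnodup [], hGkeys]
  simp only [List.map_map]
  apply List.map_congr_left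
  intro k _
  simp only [Function.comp]
  congr 1
  rw [PySem.Dict.getD_foldl_modify_append]
  simp

-- ===== VERDICT (by name: the statement is the Claim_ definition above) =====
theorem determine_field_types_spec : Claim_equal_determine_field_types := by
  unfold Claim_equal_determine_field_types
  intro rows _
  unfold Spec_determine_field_types
  rw [pvB_items]
  unfold determine_field_types
  rw [← List.foldl_flatten]
  have hAkeys : (rows.flatten.foldl pvStepA PySem.Dict.empty).keys
      = PySem.Set.ofList (rows.flatten.map Prod.fst) := by
    rw [pvFoldA_keys]; simp [PySem.Set.update_nil_left]
  have hAnodup : (rows.flatten.foldl pvStepA PySem.Dict.empty).keys.Nodup := by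
    rw [hAkeys]; exact PySem.Set.nodup_ofList _
  rw [PySem.Dict.items_eq_map_keys _ hAnodup "", hAkeys]
  apply List.map_congr_left
  intro k hk
  have hmem : k ∈ rows.flatten.map Prod.fst := (PySem.Set.mem_ofList _ _).mp hk
  have hcont : (rows.flatten.map Prod.fst).contains k = true := List.elem_iff.mpr hmem
  rw [pvFoldA_getD]
  simp only [hcont, if_true]
  have hall : (List.map (fun p => p.2) (List.filter (fun p => p.1 == k) rows.flatten)).all
      PySem.Str.strIsdigit
      = ((List.filter (fun p => p.1 == k) rows.flatten).all fun p =>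
          PySem.Chars.strIsdigit p.2.toList) := by
    rw [List.all_map]; rfl
  simp only [pvCls, hall, PySem.Dict.contains_empty, Bool.false_eq_true, if_false]
  rfl
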